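-- pv_equiv track=rewrite | github.com/sabihanjum/GFG_160 | Hashing/group_shifted_string.py | groupShiftedString
-- ===== SOURCE A (Python) =====
-- def getHash(s):
--     hashVal = []
--
--     shift = ord(s[0])-ord('a')
--
--     for ch in s:
--         newCh = chr(ord(ch)-shift)
--
--         if newCh < 'a':
--             newCh = chr(ord(newCh)+26)
--         hashVal.append(newCh)
--     return ''.join(hashVal)
--
-- def groupShiftedString(arr):
--     #code here
--     res = []
--     mp = {}
--
--     for i in range(len(arr)):
--         hashVal = getHash(arr[i])
--
--         if hashVal not in mp:
--             mp[hashVal] = len(res)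
--             res.append([])
--         res[mp[hashVal]].append(arr[i])
--     return res
-- ===== SOURCE B (Python) =====
-- def groupShiftedString(arr):
--     # Brute-force grouping without any hash map: find each first-occurrence
--     # position, then collect its whole shift-equivalence class by a nested
--     # scan of the array using a direct pairwise equivalence test.
--     def norm(u, i):
--         d = ord(u[i]) - ord(u[0])
--         return d + 26 if d < 0 else d
--
--     def same(s, t):
--         if len(s) != len(t):
--             return False
--         return all(norm(s, i) == norm(t, i) for i in range(len(s)))
--
--     return [[t for t in arr if same(arr[i], t)]
--             for i in range(len(arr))
--             if not any(same(arr[i], t) for t in arr[:i])]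
-- ===== Notes on version B (the rewrite author's own statement) =====
-- stated objective: alternative
-- what changed: B removes A's hash map and normalized-key strings entirely: it finds first-occurrence positions by scanning the preceding prefix with a direct pairwise shift-equivalence test and builds each bucket by a nested filter over the whole array.
import Mathlib
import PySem

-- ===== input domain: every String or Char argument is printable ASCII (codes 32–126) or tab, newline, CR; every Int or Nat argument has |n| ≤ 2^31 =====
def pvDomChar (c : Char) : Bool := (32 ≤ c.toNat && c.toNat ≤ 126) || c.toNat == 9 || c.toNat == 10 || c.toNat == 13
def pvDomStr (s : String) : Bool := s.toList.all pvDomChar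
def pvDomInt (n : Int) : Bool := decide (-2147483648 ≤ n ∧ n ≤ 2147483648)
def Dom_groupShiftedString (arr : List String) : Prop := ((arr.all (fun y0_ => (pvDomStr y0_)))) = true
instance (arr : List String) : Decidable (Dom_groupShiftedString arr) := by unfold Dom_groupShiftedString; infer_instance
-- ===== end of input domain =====

-- B drops A's hash map and normalized-key strings: it finds first-occurrence positions by scanning
-- the preceding prefix with a direct pairwise shift-equivalence test and builds each bucket by a
-- nested filter over the whole array (alternative algorithm, same return value).

-- ===== PORT A =====
def getHash (s : String) : String :=
  match s.toList with
  | [] => ""  -- Python raises IndexError on s[0] here; excluded by Pre_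
  | c0 :: _ =>
    let shift : Int := (c0.toNat : Int) - 97
    String.ofList (s.toList.foldl (fun hashVal ch =>
      let newCh : Char := Char.ofNat ((ch.toNat : Int) - shift).toNat
      let newCh : Char := if newCh < 'a' then Char.ofNat (newCh.toNat + 26) else newCh
      hashVal ++ [newCh]) [])

def pvStepA (st : List (List String) × PySem.Dict String Int) (s : String) :
    List (List String) × PySem.Dict String Int :=
  let hashVal := getHash s
  let st := if (st.2.get? hashVal).isNone then
      (st.1 ++ [[]], st.2.insert hashVal (st.1.length : Int))
    else st
  let idx := (st.2.getD hashVal 0).toNat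
  (st.1.set idx (st.1.getD idx [] ++ [s]), st.2)

def groupShiftedString (arr : List String) : List (List String) :=
  (arr.foldl pvStepA ([], PySem.Dict.mk [])).1

-- ===== PORT B =====
-- norm(u, i): offset of u[i] from u[0], 26 added back when negative (indices are in range,
-- so ord(u[i]) / ord(u[0]) are getD/headD with unreachable defaults — exact).
def pvNorm (u : List Char) (i : Nat) : Int :=
  let d : Int := ((u.getD i 'a').toNat : Int) - ((u.headD 'a').toNat : Int)
  if d < 0 then d + 26 else d

def pvSame (s t : List Char) : Bool :=
  if s.length ≠ t.length then false
  else (List.range s.length).all (fun i => pvNorm s i == pvNorm t i)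

-- arr[:i] with 0 ≤ i ≤ len(arr) is List.take i; arr[i] for i in range(len(arr)) is getD (in range — exact).
def groupShiftedString_alt (arr : List String) : List (List String) :=
  ((List.range arr.length).filter (fun i =>
      !((arr.take i).any (fun t => pvSame (arr.getD i "").toList t.toList)))).map
    (fun i => arr.filter (fun t => pvSame (arr.getD i "").toList t.toList))

-- ===== PRECONDITION & SPEC =====
-- Pre_ excludes exactly the inputs where Python A raises: an empty string (IndexError on s[0]) or a
-- string with a character more than 97 code points below its first character (ValueError from chr of
-- a negative ordinal).
def Pre_groupShiftedString (arr : List String) : Prop :=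
  ∀ s ∈ arr, s.toList ≠ [] ∧
    (s.toList.all (fun c => (s.toList.headD 'a').toNat ≤ c.toNat + 97)) = true
instance (arr : List String) : Decidable (Pre_groupShiftedString arr) := by
  unfold Pre_groupShiftedString; infer_instance

def pvWitness_groupShiftedString : List String := ["abc", "bcd", "az", "a"]

def Spec_groupShiftedString (arr : List String) (out : List (List String)) : Prop := out = groupShiftedString_alt arr
instance (arr : List String) (out : List (List String)) : Decidable (Spec_groupShiftedString arr out) := by unfold Spec_groupShiftedString; infer_instance

-- ===== CLAIM (what is proved, stated in full; the proofs are below) =====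
def Claim_equal_groupShiftedString : Prop := ∀ (arr : List String), Dom_groupShiftedString arr → Pre_groupShiftedString arr → Spec_groupShiftedString arr (groupShiftedString arr)

-- ===== LEMMAS AND PROOFS =====

/-- B's grouping key of a string, as a list of offsets (what pvNorm computes pointwise). -/
def pvKeyL (l : List Char) : List Int :=
  l.map (fun c => ((c.toNat : Int) - ((l.headD 'a').toNat : Int)) +
    (if (c.toNat : Int) < ((l.headD 'a').toNat : Int) then 26 else 0))

/-- Encoding of a key as A's normalized hash string. -/
def pvEncC (v : Int) : Char := Char.ofNat (v + 97).toNat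
def pvEnc (k : List Int) : String := String.ofList (k.map pvEncC)

/-- Keys whose encoding is injective (all character codes valid). -/
def pvGood (k : List Int) : Prop := ∀ v ∈ k, 0 ≤ v + 97 ∧ v + 97 < 55296

/-- First-occurrence hashes, in order. -/
def pvFK (p : List String) : List String :=
  p.foldl (fun ks s => if getHash s ∈ ks then ks else ks ++ [getHash s]) []

/-- Bucket of key k over list p. -/
def pvBucket (p : List String) (k : String) : List String :=
  p.filter (fun s => getHash s == k)

lemma pv_toNat_ofNat (n : Nat) (h : n < 55296) : (Char.ofNat n).toNat = n := by
  have hv : n.isValidChar := Or.inl h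
  simp only [Char.ofNat, dif_pos hv]
  simp [Char.ofNatAux, Char.toNat]

lemma pvEncC_inj_on (v v' : Int) (hv : 0 ≤ v + 97 ∧ v + 97 < 55296)
    (hv' : 0 ≤ v' + 97 ∧ v' + 97 < 55296) (h : pvEncC v = pvEncC v') : v = v' := by
  have := congrArg Char.toNat h
  rw [pvEncC, pvEncC, pv_toNat_ofNat _ (by omega), pv_toNat_ofNat _ (by omega)] at this
  omega

lemma pvEnc_inj : ∀ (k k' : List Int), pvGood k → pvGood k' → pvEnc k = pvEnc k' → k = k' := by
  intro k
  induction k with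
  | nil =>
    intro k' _ _ h
    have h' : ([] : List Int).map pvEncC = k'.map pvEncC := by
      have := congrArg String.toList h
      simpa [pvEnc, String.toList_ofList] using this
    cases k' with
    | nil => rfl
    | cons v t => simp at h'
  | cons v t ih =>
    intro k' hg hg' h
    have h' : (v :: t).map pvEncC = k'.map pvEncC := by
      have := congrArg String.toList h
      simpa [pvEnc, String.toList_ofList] using this
    cases k' with
    | nil => simp at h'
    | cons v' t' =>
      simp only [List.map_cons, List.cons.injEq] at h'
      have hv := hg v (by simp)
      have hv' := hg' v' (by simp)
      have hvv : v = v' := pvEncC_inj_on v v' hv hv' h'.1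
      have htt : t = t' := ih t' (fun x hx => hg x (by simp [hx]))
        (fun x hx => hg' x (by simp [hx]))
        (by unfold pvEnc; rw [h'.2])
      rw [hvv, htt]

lemma pvCharBounds (c : Char) (h : pvDomChar c = true) : 9 ≤ c.toNat ∧ c.toNat ≤ 126 := by
  simp [pvDomChar] at h
  omega

lemma pv_good_key (s : String) (hdom : pvDomStr s = true) : pvGood (pvKeyL s.toList) := by
  intro v hv
  simp only [pvKeyL, List.mem_map] at hv
  obtain ⟨c, hc, hcv⟩ := hv
  simp only [pvDomStr, List.all_eq_true] at hdom
  cases hs : s.toList with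
  | nil => rw [hs] at hc; simp at hc
  | cons c0 rest =>
    have hdc := pvCharBounds c (hdom c hc)
    have hdc0 := pvCharBounds c0 (hdom c0 (by rw [hs]; simp))
    rw [hs] at hcv
    simp only [List.headD_cons] at hcv
    subst hcv
    constructor <;> (split <;> omega)

lemma pv_getHash_eq (s : String) (c0 : Char) (rest : List Char) (hs : s.toList = c0 :: rest)
    (hdom : pvDomStr s = true)
    (hpre : ∀ c ∈ s.toList, ((s.toList.headD 'a').toNat : Int) - 97 ≤ (c.toNat : Int)) :
    getHash s = pvEnc (pvKeyL s.toList) := by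
  unfold getHash pvKeyL
  rw [hs]
  simp only [List.headD_cons, pvEnc]
  rw [PySem.List.foldl_append_singleton_eq_map]
  rw [List.map_map, List.nil_append]
  congr 1
  apply List.map_congr_left
  intro c hc
  have hc' : c ∈ s.toList := by rw [hs]; exact hc
  have hdc := pvCharBounds c (by
    simp only [pvDomStr, List.all_eq_true] at hdom; exact hdom c hc')
  have hdc0 := pvCharBounds c0 (by
    simp only [pvDomStr, List.all_eq_true] at hdom
    exact hdom c0 (by rw [hs]; simp))
  have hp := hpre c hc'
  rw [hs] at hp; simp only [List.headD_cons] at hp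
  simp only [Function.comp_apply, pvEncC]
  have hn0 : (0:Int) ≤ (c.toNat : Int) - ((c0.toNat : Int) - 97) := by omega
  have hnlt : ((c.toNat : Int) - ((c0.toNat : Int) - 97)).toNat < 55296 := by omega
  have htn : (Char.ofNat ((c.toNat : Int) - ((c0.toNat : Int) - 97)).toNat).toNat
      = ((c.toNat : Int) - ((c0.toNat : Int) - 97)).toNat := pv_toNat_ofNat _ hnlt
  have hlt : (Char.ofNat ((c.toNat : Int) - ((c0.toNat : Int) - 97)).toNat < 'a')
      ↔ ((c.toNat : Int) < (c0.toNat : Int)) := by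
    rw [Char.lt_def]
    change (Char.ofNat _).toNat < ('a').toNat ↔ _
    rw [htn]
    show _ < 97 ↔ _
    omega
  by_cases hcase : (c.toNat : Int) < (c0.toNat : Int)
  · rw [if_pos (hlt.mpr hcase), if_pos hcase]
    congr 1
    rw [htn]
    omega
  · rw [if_neg (fun hx => hcase (hlt.mp hx)), if_neg hcase]
    congr 1
    omega

-- ---------- pvFK : first-occurrence keys ----------

lemma pvFK_mem_foldl : ∀ (l : List String) (acc : List String) (x : String),
    x ∈ l.foldl (fun ks s => if getHash s ∈ ks then ks else ks ++ [getHash s]) acc ↔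
      x ∈ acc ∨ ∃ s ∈ l, getHash s = x := by
  intro l
  induction l with
  | nil => intro acc x; simp
  | cons a t ih =>
    intro acc x
    simp only [List.foldl_cons, ih]
    by_cases h : getHash a ∈ acc
    · rw [if_pos h]
      constructor
      · rintro (hx | hx)
        · exact Or.inl hx
        · exact Or.inr (by obtain ⟨s, hs1, hs2⟩ := hx; exact ⟨s, by simp [hs1], hs2⟩)
      · rintro (hx | ⟨s, hs, hsx⟩)
        · exact Or.inl hx
        · rcases List.mem_cons.mp hs with hsa | hst
          · exact Or.inl (by rw [← hsx, hsa]; exact h)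
          · exact Or.inr ⟨s, hst, hsx⟩
    · rw [if_neg h]
      constructor
      · rintro (hx | hx)
        · rcases List.mem_append.mp hx with hx | hx
          · exact Or.inl hx
          · exact Or.inr ⟨a, by simp, (List.mem_singleton.mp hx).symm⟩
        · exact Or.inr (by obtain ⟨s, hs1, hs2⟩ := hx; exact ⟨s, by simp [hs1], hs2⟩)
      · rintro (hx | ⟨s, hs, hsx⟩)
        · exact Or.inl (List.mem_append.mpr (Or.inl hx))
        · rcases List.mem_cons.mp hs with hsa | hst
          · exact Or.inl (List.mem_append.mpr (Or.inr (by simp [← hsx, hsa])))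
          · exact Or.inr ⟨s, hst, hsx⟩

lemma pvFK_mem (p : List String) (x : String) :
    x ∈ pvFK p ↔ ∃ s ∈ p, getHash s = x := by
  rw [pvFK, pvFK_mem_foldl]; simp

lemma pvFK_nodup_foldl : ∀ (l : List String) (acc : List String), acc.Nodup →
    (l.foldl (fun ks s => if getHash s ∈ ks then ks else ks ++ [getHash s]) acc).Nodup := by
  intro l
  induction l with
  | nil => intro acc h; exact h
  | cons a t ih =>
    intro acc h
    simp only [List.foldl_cons]
    by_cases hm : getHash a ∈ acc
    · rw [if_pos hm]; exact ih acc h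
    · rw [if_neg hm]
      exact ih _ (by
        rw [List.nodup_append]
        exact ⟨h, List.nodup_singleton _, by
          intro x hx y hy
          rw [List.mem_singleton] at hy
          exact fun hxy => hm ((hxy.trans hy) ▸ hx)⟩)

lemma pvFK_nodup (p : List String) : (pvFK p).Nodup :=
  pvFK_nodup_foldl p [] List.nodup_nil

lemma pvFK_append (p : List String) (s : String) :
    pvFK (p ++ [s]) = if getHash s ∈ pvFK p then pvFK p else pvFK p ++ [getHash s] := by
  rw [pvFK, List.foldl_append]
  rfl

-- ---------- idxOf? helpers ----------

lemma pv_idxOf?_append_ne {K : Type} [BEq K] [LawfulBEq K] (l : List K) (k k' : K) (h : k' ≠ k) :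
    (l ++ [k]).idxOf? k' = l.idxOf? k' := by
  induction l with
  | nil => simp [List.idxOf?_cons, (by simpa using Ne.symm h : ¬ (k == k') = true)]
  | cons a t ih =>
    rw [List.cons_append, List.idxOf?_cons, List.idxOf?_cons, ih]

lemma pv_idxOf?_append_self {K : Type} [BEq K] [LawfulBEq K] (l : List K) (k : K) (h : k ∉ l) :
    (l ++ [k]).idxOf? k = some l.length := by
  induction l with
  | nil => simp [List.idxOf?_cons]
  | cons a t ih =>
    have ha : ¬ (a == k) = true := by
      simp only [beq_iff_eq]; intro hx; exact h (by simp [hx])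
    rw [List.cons_append, List.idxOf?_cons, if_neg ha, ih (fun hx => h (by simp [hx]))]
    simp

/-- Rewriting a map at the unique position of k. -/
lemma pv_map_eq_set {α K : Type} [BEq K] [LawfulBEq K] :
    ∀ (l : List K) (i : Nat) (k : K) (f f' : K → α), l.Nodup → l.idxOf? k = some i →
      (∀ x ∈ l, x ≠ k → f' x = f x) → l.map f' = (l.map f).set i (f' k) := by
  intro l
  induction l with
  | nil => intro i k f f' _ hi _; simp [List.idxOf?_nil] at hi
  | cons a t ih =>
    intro i k f f' hnd hi hagree
    rw [List.idxOf?_cons] at hi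
    by_cases hak : a = k
    · rw [if_pos (by simpa using hak)] at hi
      have hi0 : i = 0 := by injection hi with h; omega
      subst hi0; subst hak
      have hknot : a ∉ t := (List.nodup_cons.mp hnd).1
      simp only [List.map_cons, List.set_cons_zero]
      congr 1
      exact List.map_congr_left (fun x hx => hagree x (by simp [hx]) (fun he => hknot (he ▸ hx)))
    · rw [if_neg (by simpa using hak)] at hi
      obtain ⟨j, hj, hij⟩ := Option.map_eq_some_iff.mp hi
      subst hij
      simp only [List.map_cons, List.set_cons_succ]
      rw [hagree a (by simp) hak,
        ih j k f f' (List.nodup_cons.mp hnd).2 hj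
          (fun x hx => hagree x (by simp [hx]))]

-- ---------- bucket lemmas ----------

lemma pvBucket_append (p : List String) (s : String) (k : String) :
    pvBucket (p ++ [s]) k = pvBucket p k ++ (if getHash s == k then [s] else []) := by
  rw [pvBucket, pvBucket, List.filter_append]
  congr 1
  simp [List.filter]
  split <;> simp_all

lemma pvBucket_nil_of_not_mem (p : List String) (k : String) (h : k ∉ pvFK p) :
    pvBucket p k = [] := by
  rw [pvBucket, List.filter_eq_nil_iff]
  intro s hs
  simp only [beq_iff_eq]
  intro he
  exact h ((pvFK_mem p k).mpr ⟨s, hs, he⟩)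

-- ---------- A's loop ----------

/-- Invariant relating A's state after processing p to the spec. -/
def pvInvA (p : List String) (res : List (List String)) (mp : PySem.Dict String Int) : Prop :=
  res = (pvFK p).map (pvBucket p) ∧
  ∀ k, mp.get? k = ((pvFK p).idxOf? k).map (fun i => (i : Int))

lemma pvA_step (p : List String) (res : List (List String)) (mp : PySem.Dict String Int)
    (s : String) (hInv : pvInvA p res mp) :
    pvInvA (p ++ [s]) (pvStepA (res, mp) s).1 (pvStepA (res, mp) s).2 := by
  obtain ⟨hres, hmp⟩ := hInv
  have hlen : res.length = (pvFK p).length := by rw [hres, List.length_map]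
  unfold pvStepA
  by_cases hmem : getHash s ∈ pvFK p
  · -- existing key
    cases hidx : (pvFK p).idxOf? (getHash s) with
    | none => exact absurd (List.idxOf?_eq_none_iff.mp hidx) (by simpa using hmem)
    | some i =>
      have hget : mp.get? (getHash s) = some (i : Int) := by rw [hmp, hidx]; rfl
      have hnone : (mp.get? (getHash s)).isNone = false := by rw [hget]; rfl
      simp only [hnone, Bool.false_eq_true, if_false]
      have hgd : mp.getD (getHash s) 0 = (i : Int) := by
        rw [PySem.Dict.getD_eq_get?_getD, hget]; rfl
      simp only [hgd, Int.toNat_natCast]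
      obtain ⟨hilt, hiEq, _⟩ := List.idxOf?_eq_some_iff.mp hidx
      have hresget : res.getD i [] = pvBucket p (getHash s) := by
        rw [hres, List.getD_eq_getElem?_getD, List.getElem?_map,
          List.getElem?_eq_getElem hilt]
        simp [hiEq]
      have hfk : pvFK (p ++ [s]) = pvFK p := by rw [pvFK_append, if_pos hmem]
      constructor
      · rw [hfk, hresget,
          pv_map_eq_set (pvFK p) i (getHash s) (pvBucket p) (pvBucket (p ++ [s]))
            (pvFK_nodup p) hidx
            (fun k _ hk => by
              rw [pvBucket_append, if_neg (by simpa using Ne.symm hk)]; simp),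
          ← hres]
        congr 1
        rw [pvBucket_append, if_pos (by simp)]
      · intro k; rw [hfk]; exact hmp k
  · -- fresh key
    have hget : mp.get? (getHash s) = none := by
      rw [hmp, List.idxOf?_eq_none_iff.mpr (by simpa using hmem)]; rfl
    have hnone : (mp.get? (getHash s)).isNone = true := by rw [hget]; rfl
    simp only [hnone, if_pos]
    have hgd : (mp.insert (getHash s) (res.length : Int)).getD (getHash s) 0
        = (res.length : Int) := by
      rw [PySem.Dict.getD_eq_get?_getD, PySem.Dict.get?_insert_self]; rfl
    simp only [hgd, Int.toNat_natCast]
    have hgetD : (res ++ [[]]).getD res.length [] = [] := by simp [List.getD]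
    have hset : (res ++ [[]]).set res.length ((res ++ [[]]).getD res.length [] ++ [s])
        = res ++ [[s]] := by
      rw [hgetD, List.set_append, if_neg (by omega)]
      simp
    have hfk : pvFK (p ++ [s]) = pvFK p ++ [getHash s] := by
      rw [pvFK_append, if_neg hmem]
    constructor
    · rw [hset, hfk, List.map_append]
      congr 1
      · rw [hres]
        apply List.map_congr_left
        intro k hk
        rw [pvBucket_append, if_neg (by
          simp only [beq_iff_eq]
          intro he
          exact hmem (by rw [he]; exact hk))]
        simp
      · simp only [List.map_cons, List.map_nil]
        rw [pvBucket_append, if_pos (by simp), pvBucket_nil_of_not_mem p _ hmem]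
        rfl
    · intro k
      rw [hfk, PySem.Dict.get?_insert]
      by_cases hkk : k = getHash s
      · subst hkk
        rw [if_pos rfl, pv_idxOf?_append_self _ _ hmem, hlen]
        rfl
      · rw [if_neg hkk, pv_idxOf?_append_ne _ _ _ hkk]
        exact hmp k

lemma pvA_loop : ∀ (l p : List String) (res : List (List String)) (mp : PySem.Dict String Int),
    pvInvA p res mp →
    (l.foldl pvStepA (res, mp)).1 = (pvFK (p ++ l)).map (pvBucket (p ++ l)) := by
  intro l
  induction l with
  | nil => intro p res mp hInv; simpa using hInv.1
  | cons s t ih =>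
    intro p res mp hInv
    have hstep := pvA_step p res mp s hInv
    simp only [List.foldl_cons]
    have := ih (p ++ [s]) (pvStepA (res, mp) s).1 (pvStepA (res, mp) s).2 hstep
    simpa using this

-- ---------- B's side ----------

lemma pv_any_congr {α : Type} (l : List α) (f g : α → Bool) (h : ∀ x ∈ l, f x = g x) :
    l.any f = l.any g := by
  induction l with
  | nil => rfl
  | cons a t ih =>
    simp only [List.any_cons, h a (by simp), ih (fun x hx => h x (by simp [hx]))]

lemma pvKeyL_getElem (l : List Char) (i : Nat) (h : i < l.length)
    (h2 : i < (pvKeyL l).length) :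
    pvNorm l i = (pvKeyL l)[i]'h2 := by
  simp only [pvKeyL, List.getElem_map, pvNorm, List.getD_eq_getElem?_getD,
    List.getElem?_eq_getElem h, Option.getD_some]
  split_ifs <;> omega

lemma pvSame_eq_beq (s t : List Char) : pvSame s t = (pvKeyL s == pvKeyL t) := by
  unfold pvSame
  have hls : (pvKeyL s).length = s.length := by simp [pvKeyL]
  have hlt : (pvKeyL t).length = t.length := by simp [pvKeyL]
  by_cases hl : s.length = t.length
  · rw [if_neg (by omega)]
    rw [Bool.eq_iff_iff, List.all_eq_true, beq_iff_eq]
    constructor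
    · intro hall
      apply List.ext_getElem (by omega)
      intro i h1 h2
      have := hall i (List.mem_range.mpr (by omega))
      rw [beq_iff_eq] at this
      rw [← pvKeyL_getElem s i (by omega) h1, ← pvKeyL_getElem t i (by omega) h2]
      exact this
    · intro heq i hi
      rw [List.mem_range] at hi
      rw [beq_iff_eq, pvKeyL_getElem s i (by omega) (by rw [hls]; omega),
        pvKeyL_getElem t i (by omega) (by rw [hlt]; omega)]
      simp [heq]
  · rw [if_pos (by omega)]
    symm
    rw [beq_eq_false_iff_ne]
    intro he
    exact hl (by rw [← hls, ← hlt, he])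

/-- Under Dom and Pre (per-string), pvSame is hash equality. -/
lemma pvSame_eq_hash (s t : String)
    (hds : pvDomStr s = true) (hdt : pvDomStr t = true)
    (hps : s.toList ≠ [] ∧ (s.toList.all (fun c => (s.toList.headD 'a').toNat ≤ c.toNat + 97)) = true)
    (hpt : t.toList ≠ [] ∧ (t.toList.all (fun c => (t.toList.headD 'a').toNat ≤ c.toNat + 97)) = true) :
    pvSame s.toList t.toList = (getHash s == getHash t) := by
  obtain ⟨cs, rs, hcs⟩ := List.exists_cons_of_ne_nil hps.1
  obtain ⟨ct, rt, hct⟩ := List.exists_cons_of_ne_nil hpt.1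
  have hpre : ∀ (u : String), (u.toList.all (fun c => (u.toList.headD 'a').toNat ≤ c.toNat + 97)) = true →
      ∀ c ∈ u.toList, ((u.toList.headD 'a').toNat : Int) - 97 ≤ (c.toNat : Int) := by
    intro u hu c hc
    rw [List.all_eq_true] at hu
    have := hu c hc
    simp only [decide_eq_true_eq] at this
    omega
  have hhs := pv_getHash_eq s cs rs hcs hds (hpre s hps.2)
  have hht := pv_getHash_eq t ct rt hct hdt (hpre t hpt.2)
  rw [pvSame_eq_beq, Bool.eq_iff_iff, beq_iff_eq, beq_iff_eq, hhs, hht]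
  constructor
  · intro h; rw [h]
  · intro h
    exact pvEnc_inj _ _ (pv_good_key s hds) (pv_good_key t hdt) h

-- first-occurrence indices mapped to hashes give pvFK
lemma pvFOK (arr : List String) :
    ((List.range arr.length).filter (fun i =>
        !((arr.take i).any (fun t => getHash t == getHash (arr.getD i ""))))).map
      (fun i => getHash (arr.getD i "")) = pvFK arr := by
  induction arr using List.reverseRecOn with
  | nil => rfl
  | append_singleton p s ih =>
    have hlen : (p ++ [s]).length = p.length + 1 := by simp
    rw [hlen, List.range_succ, List.filter_append, List.map_append]
    have htake : ∀ i, i < p.length → (p ++ [s]).take i = p.take i := by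
      intro i hi
      rw [List.take_append_of_le_length (by omega)]
    have hgetD : ∀ i, i < p.length → (p ++ [s]).getD i "" = p.getD i "" := by
      intro i hi
      rw [List.getD_eq_getElem?_getD, List.getD_eq_getElem?_getD,
        List.getElem?_append_left hi]
    have hfilter : (List.range p.length).filter (fun i =>
        !(((p ++ [s]).take i).any (fun t => getHash t == getHash ((p ++ [s]).getD i ""))))
        = (List.range p.length).filter (fun i =>
        !((p.take i).any (fun t => getHash t == getHash (p.getD i "")))) := by
      apply List.filter_congr
      intro i hi
      rw [List.mem_range] at hi
      rw [htake i hi, hgetD i hi]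
    have hmap : ∀ l, l ⊆ List.range p.length →
        l.map (fun i => getHash ((p ++ [s]).getD i "")) = l.map (fun i => getHash (p.getD i "")) := by
      intro l hsub
      apply List.map_congr_left
      intro i hil
      have := List.mem_range.mp (hsub hil)
      rw [hgetD i this]
    rw [hfilter, hmap _ (fun x hx => List.mem_of_mem_filter hx), ih]
    have htakelast : (p ++ [s]).take p.length = p := by
      rw [List.take_append_of_le_length (le_refl _), List.take_length]
    have hgetlast : (p ++ [s]).getD p.length "" = s := by
      rw [List.getD_eq_getElem?_getD, List.getElem?_append_right (le_refl _)]
      simp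
    have hany : (p.any (fun t => getHash t == getHash s)) = decide (getHash s ∈ pvFK p) := by
      rw [Bool.eq_iff_iff, List.any_eq_true, decide_eq_true_eq, pvFK_mem]
      constructor
      · rintro ⟨t, ht, he⟩; exact ⟨t, ht, by simpa using he⟩
      · rintro ⟨t, ht, he⟩; exact ⟨t, ht, by simpa using he⟩
    rw [pvFK_append]
    by_cases hmem : getHash s ∈ pvFK p
    · rw [if_pos hmem]
      have : ([p.length].filter (fun i =>
          !(((p ++ [s]).take i).any (fun t => getHash t == getHash ((p ++ [s]).getD i ""))))) = [] := by
        simp only [List.filter, htakelast, hgetlast, hany]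
        simp [hmem]
      rw [this]
      simp
    · rw [if_neg hmem]
      have : ([p.length].filter (fun i =>
          !(((p ++ [s]).take i).any (fun t => getHash t == getHash ((p ++ [s]).getD i ""))))) = [p.length] := by
        simp only [List.filter, htakelast, hgetlast, hany]
        simp [hmem]
      rw [this]
      simp

-- ===== VERDICT (by name: the statement is the Claim_ definition above) =====
theorem groupShiftedString_spec : Claim_equal_groupShiftedString := by
  intro arr hdom hpre
  unfold Spec_groupShiftedString
  have hdom' : ∀ s ∈ arr, pvDomStr s = true := by
    simp only [Dom_groupShiftedString, List.all_eq_true] at hdom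
    exact hdom
  -- A's side
  have hA : groupShiftedString arr = (pvFK arr).map (pvBucket arr) := by
    unfold groupShiftedString
    have := pvA_loop arr [] [] (PySem.Dict.mk []) ⟨rfl, by
      intro k
      simp [PySem.Dict.get?, List.idxOf?_nil, pvFK]⟩
    simpa using this
  -- B's side: replace pvSame by hash equality
  have hmemD : ∀ i, i < arr.length → arr.getD i "" ∈ arr := by
    intro i hi
    rw [List.getD_eq_getElem?_getD, List.getElem?_eq_getElem hi]
    exact List.getElem_mem hi
  have hsame : ∀ i, i < arr.length → ∀ t ∈ arr,
      pvSame (arr.getD i "").toList t.toList = (getHash t == getHash (arr.getD i "")) := by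
    intro i hi t ht
    have hs := hmemD i hi
    rw [pvSame_eq_hash _ _ (hdom' _ hs) (hdom' t ht) (hpre _ hs) (hpre t ht)]
    rw [Bool.eq_iff_iff, beq_iff_eq, beq_iff_eq]
    exact eq_comm
  have hB : groupShiftedString_alt arr =
      ((List.range arr.length).filter (fun i =>
          !((arr.take i).any (fun t => getHash t == getHash (arr.getD i ""))))).map
        (fun i => arr.filter (fun t => getHash t == getHash (arr.getD i ""))) := by
    unfold groupShiftedString_alt
    have hfeq : (List.range arr.length).filter (fun i =>
        !((arr.take i).any (fun t => pvSame (arr.getD i "").toList t.toList)))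
        = (List.range arr.length).filter (fun i =>
        !((arr.take i).any (fun t => getHash t == getHash (arr.getD i "")))) := by
      apply List.filter_congr
      intro i hi
      rw [List.mem_range] at hi
      congr 1
      exact pv_any_congr _ _ _ (fun t ht => hsame i hi t (List.mem_of_mem_take ht))
    rw [hfeq]
    apply List.map_congr_left
    intro i hif
    have hi : i < arr.length := List.mem_range.mp (List.mem_of_mem_filter hif)
    apply List.filter_congr
    intro t ht
    exact hsame i hi t ht
  rw [hA, hB]
  have hcomp : ((List.range arr.length).filter (fun i =>
      !((arr.take i).any (fun t => getHash t == getHash (arr.getD i ""))))).map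
        (fun i => arr.filter (fun t => getHash t == getHash (arr.getD i "")))
      = (((List.range arr.length).filter (fun i =>
      !((arr.take i).any (fun t => getHash t == getHash (arr.getD i ""))))).map
        (fun i => getHash (arr.getD i ""))).map (pvBucket arr) := by
    rw [List.map_map]
    rfl
  rw [hcomp, pvFOK]
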